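-- pv_equiv track=rewrite | github.com/markwilkie/HomeAutomation | used-car-scanner/scan.py | _specs_to_description
-- ===== SOURCE A (Python) =====
-- def _specs_to_description(specs: dict[str, str]) -> str:
--     """Build a description string from extracted specs, focusing on filter-relevant fields."""
--     # Normalize spec keys to find drivetrain / body / doors info
--     KEY_MAP = {
--         "drive": "Drive", "drivetrain": "Drive", "drive type": "Drive",
--         "drivetype": "Drive", "drive train": "Drive",
--         "drivewheel": "Drive", "drive wheel": "Drive",
--         "body": "Body", "body style": "Body", "bodystyle": "Body",
--         "body type": "Body", "cab": "Body", "cab style": "Body",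
--         "doors": "Doors", "number of doors": "Doors",
--         "engine": "Engine", "transmission": "Trans", "trans": "Trans",
--         "fuel": "Fuel", "fuel type": "Fuel",
--         "title": "Title", "title status": "Title", "title type": "Title",
--     }
--     normalized: dict[str, str] = {}
--     for key, value in specs.items():
--         mapped = KEY_MAP.get(key.lower().strip())
--         if mapped and mapped not in normalized:
--             normalized[mapped] = value
--
--     parts = []
--     for label in ["Drive", "Body", "Doors", "Engine", "Trans", "Fuel", "Title"]:
--         if label in normalized:
--             parts.append(f"{label}: {normalized[label]}")
--     return " | ".join(parts)
-- ===== SOURCE B (Python) =====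
-- def _specs_to_description(specs: dict[str, str]) -> str:
--     """Build a description string from extracted specs, focusing on filter-relevant fields."""
--     # KEY_MAP inverted: each output label with its set of accepted (normalized) spec keys,
--     # already in output order.
--     GROUPS = [
--         ("Drive", ["drive", "drivetrain", "drive type", "drivetype",
--                    "drive train", "drivewheel", "drive wheel"]),
--         ("Body", ["body", "body style", "bodystyle", "body type", "cab", "cab style"]),
--         ("Doors", ["doors", "number of doors"]),
--         ("Engine", ["engine"]),
--         ("Trans", ["transmission", "trans"]),
--         ("Fuel", ["fuel", "fuel type"]),
--         ("Title", ["title", "title status", "title type"]),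
--     ]
--
--     def first_value(syns):
--         for key, value in specs.items():
--             if key.lower().strip() in syns:
--                 return value
--         return None
--
--     return " | ".join(
--         f"{label}: {v}" for label, syns in GROUPS
--         if (v := first_value(syns)) is not None
--     )
-- ===== Notes on version B (the rewrite author's own statement) =====
-- stated objective: simpler
-- what changed: Replaces A's KEY_MAP dict plus intermediate 'normalized' dict with an inverted label-to-synonyms table: for each label in output order, take the value of the first spec whose normalized key is in that label's synonym list, and join the hits directly.
import Mathlib
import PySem

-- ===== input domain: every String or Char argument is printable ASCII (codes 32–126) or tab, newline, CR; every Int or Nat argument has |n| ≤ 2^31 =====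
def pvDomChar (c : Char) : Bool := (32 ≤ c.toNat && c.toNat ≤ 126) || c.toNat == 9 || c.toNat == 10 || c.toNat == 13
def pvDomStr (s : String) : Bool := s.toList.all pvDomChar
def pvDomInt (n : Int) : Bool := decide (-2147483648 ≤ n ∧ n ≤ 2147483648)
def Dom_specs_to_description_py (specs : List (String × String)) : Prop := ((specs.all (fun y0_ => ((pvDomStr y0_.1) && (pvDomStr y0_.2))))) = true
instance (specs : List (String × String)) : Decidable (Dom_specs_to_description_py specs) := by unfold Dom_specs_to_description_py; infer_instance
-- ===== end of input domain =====

-- B replaces A's KEY_MAP + intermediate normalized-dict build by an inverted label → synonym-keys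
-- table scanned label by label (simpler decomposition, same result).
-- NOTE: both Pythons take `specs` as a dict; here it is its association list in insertion order (distinct keys).

-- key.lower().strip(), the normalisation both Pythons share
def pvNorm (key : String) : String := PySem.Str.strip (PySem.Str.lower key)

-- ===== PORT A =====
-- KEY_MAP of A's Python
def pvKeyMapList : List (String × String) := [
  ("drive", "Drive"), ("drivetrain", "Drive"), ("drive type", "Drive"),
  ("drivetype", "Drive"), ("drive train", "Drive"),
  ("drivewheel", "Drive"), ("drive wheel", "Drive"),
  ("body", "Body"), ("body style", "Body"), ("bodystyle", "Body"),
  ("body type", "Body"), ("cab", "Body"), ("cab style", "Body"),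
  ("doors", "Doors"), ("number of doors", "Doors"),
  ("engine", "Engine"), ("transmission", "Trans"), ("trans", "Trans"),
  ("fuel", "Fuel"), ("fuel type", "Fuel"),
  ("title", "Title"), ("title status", "Title"), ("title type", "Title")]

def pvKeyMap : PySem.Dict String String := PySem.Dict.ofList pvKeyMapList

def specs_to_description_py (specs : List (String × String)) : String :=
  let normalized : PySem.Dict String String :=
    specs.foldl (fun d kv =>
      match pvKeyMap.get? (pvNorm kv.1) with
      -- `if mapped and mapped not in normalized`: every KEY_MAP value is a nonempty
      -- string, so `mapped` is truthy exactly when the .get found a key.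
      | some mapped => if d.contains mapped then d else d.insert mapped kv.2
      | none => d) PySem.Dict.empty
  let parts : List String :=
    ["Drive", "Body", "Doors", "Engine", "Trans", "Fuel", "Title"].foldl (fun ps label =>
      match normalized.get? label with
      | some v => ps ++ [label ++ ": " ++ v]
      | none => ps) []
  PySem.Str.join " | " parts

-- ===== PORT B =====
-- KEY_MAP inverted: each label with the list of raw keys that map to it, in output order
def pvSynDrive : List String := ["drive", "drivetrain", "drive type", "drivetype",
                                 "drive train", "drivewheel", "drive wheel"]
def pvSynBody : List String := ["body", "body style", "bodystyle", "body type", "cab", "cab style"]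
def pvSynDoors : List String := ["doors", "number of doors"]
def pvSynEngine : List String := ["engine"]
def pvSynTrans : List String := ["transmission", "trans"]
def pvSynFuel : List String := ["fuel", "fuel type"]
def pvSynTitle : List String := ["title", "title status", "title type"]

def pvGroups : List (String × List String) := [
  ("Drive", pvSynDrive), ("Body", pvSynBody), ("Doors", pvSynDoors),
  ("Engine", pvSynEngine), ("Trans", pvSynTrans), ("Fuel", pvSynFuel),
  ("Title", pvSynTitle)]

-- `first_value(syns)`: value of the first spec whose normalized key is in `syns`, else None
def pvFirstValue (syns : List String) : List (String × String) → Option String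
  | [] => none
  | kv :: rest =>
      if syns.contains (pvNorm kv.1) then some kv.2 else pvFirstValue syns rest

def specs_to_description_py_alt (specs : List (String × String)) : String :=
  PySem.Str.join " | "
    (pvGroups.filterMap (fun g =>
      (pvFirstValue g.2 specs).map (fun v => g.1 ++ ": " ++ v)))

-- ===== PRECONDITION & SPEC =====
def Spec_specs_to_description_py (specs : List (String × String)) (out : String) : Prop := out = specs_to_description_py_alt specs
instance (specs : List (String × String)) (out : String) : Decidable (Spec_specs_to_description_py specs out) := by unfold Spec_specs_to_description_py; infer_instance

-- ===== CLAIM (what is proved, stated in full; the proofs are below) =====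
def Claim_equal_specs_to_description_py : Prop := ∀ (specs : List (String × String)), Dom_specs_to_description_py specs → Spec_specs_to_description_py specs (specs_to_description_py specs)

-- ===== LEMMAS AND PROOFS =====

-- A's normalized dict answers each label with the value of the first spec whose key maps to it
theorem pv_loop_get (specs : List (String × String)) (d : PySem.Dict String String) (l : String) :
    (specs.foldl (fun d kv =>
      match pvKeyMap.get? (pvNorm kv.1) with
      | some mapped => if d.contains mapped then d else d.insert mapped kv.2
      | none => d) d).get? l
    = (d.get? l).or ((specs.find? (fun kv => pvKeyMap.get? (pvNorm kv.1) == some l)).map (·.2)) := by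
  induction specs generalizing d with
  | nil => simp
  | cons kv rest ih =>
    simp only [List.foldl_cons, List.find?_cons]
    cases hm : pvKeyMap.get? (pvNorm kv.1) with
    | none => simp [ih]
    | some m =>
      by_cases hml : m = l
      · subst hml
        by_cases hc : d.contains m
        · have hs : (d.get? m).isSome := by
            rw [← PySem.Dict.contains_eq_isSome_get?]; exact hc
          cases hget : d.get? m with
          | none => simp [hget] at hs
          | some w => simp [hc, ih, hget]
        · have hn : d.get? m = none :=
            (PySem.Dict.get?_eq_none_iff_contains d m).mpr (by simpa using hc)
          simp [hc, ih, hn, PySem.Dict.get?_insert_self]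
      · have hbm : (m == l) = false := beq_eq_false_iff_ne.mpr hml
        by_cases hc : d.contains m
        · simp [hc, ih, hbm]
        · simp [hc, ih, hbm, PySem.Dict.get?_insert_of_ne d kv.2 (Ne.symm hml)]

-- a first-match lookup in a distinct-key literal dict yields `label` exactly on the keys filtered for `label`
theorem pv_lookup_eq (L : List (String × String)) (hnd : (L.map (·.1)).Nodup) (label u : String) :
    ((PySem.Dict.mk L).get? u == some label)
      = ((L.filter (fun p => p.2 == label)).map (·.1)).contains u := by
  induction L with
  | nil => simp [PySem.Dict.get?]
  | cons p rest ih =>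
    obtain ⟨k, v⟩ := p
    simp only [List.map_cons, List.nodup_cons] at hnd
    obtain ⟨hk, hnd'⟩ := hnd
    rw [PySem.Dict.get?_mk_cons]
    by_cases hvl : v = label
    · subst hvl
      by_cases hku : k = u
      · subst hku; simp
      · have hb : (k == u) = false := by simp [hku]
        have hb2 : (u == k) = false := by simp [Ne.symm hku]
        simp only [hb, Bool.false_eq_true, ite_false, ih hnd', List.filter_cons,
          beq_self_eq_true, if_pos, List.map_cons, List.contains_cons, hb2, Bool.false_or]
    · have hvb : (v == label) = false := by simp [hvl]
      by_cases hku : k = u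
      · subst hku
        have h2 : k ∉ (rest.filter (fun p => p.2 == label)).map (·.1) := fun hm => by
          obtain ⟨q, hq, hqe⟩ := List.mem_map.mp hm
          exact hk (hqe ▸ List.mem_map_of_mem (List.mem_of_mem_filter hq))
        simp [hvb, List.contains_eq_mem, h2]
      · have hb : (k == u) = false := by simp [hku]
        simp [hb, hvb, ih hnd']

-- the inverted table agrees with KEY_MAP: looking up u yields g's label iff u is one of g's synonyms
theorem pv_keymap_syn (g : String × List String) (hg : g ∈ pvGroups) (u : String) :
    (pvKeyMap.get? u == some g.1) = g.2.contains u := by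
  have hnd : (pvKeyMapList.map (·.1)).Nodup := by decide
  have hmk : pvKeyMap = PySem.Dict.mk pvKeyMapList := rfl
  fin_cases hg <;> (rw [hmk, pv_lookup_eq pvKeyMapList hnd]; rfl)

-- per label, A's first-match over specs equals B's first_value on the synonym list
theorem pv_find_eq_firstValue (g : String × List String) (hg : g ∈ pvGroups) (specs : List (String × String)) :
    ((specs.find? (fun kv => pvKeyMap.get? (pvNorm kv.1) == some g.1)).map (·.2))
      = pvFirstValue g.2 specs := by
  induction specs with
  | nil => rfl
  | cons kv rest ih =>
    rw [List.find?_cons, pvFirstValue]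
    rw [pv_keymap_syn g hg (pvNorm kv.1)] at *
    by_cases h : pvNorm kv.1 ∈ g.2 <;> simp [h, ih]

-- ===== VERDICT (by name: the statement is the Claim_ definition above) =====
theorem specs_to_description_py_spec : Claim_equal_specs_to_description_py := by
  intro specs _
  unfold Spec_specs_to_description_py specs_to_description_py specs_to_description_py_alt
  dsimp only
  congr 1
  set N := specs.foldl (fun d kv =>
      match pvKeyMap.get? (pvNorm kv.1) with
      | some mapped => if d.contains mapped then d else d.insert mapped kv.2
      | none => d) PySem.Dict.empty with hN
  have hfv : ∀ (label : String) (syns : List String), (label, syns) ∈ pvGroups →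
      N.get? label = pvFirstValue syns specs := by
    intro label syns hg
    rw [hN, pv_loop_get, ← pv_find_eq_firstValue (label, syns) hg]
    simp
  have hfun : (fun (ps : List String) label =>
      match N.get? label with
      | some v => ps ++ [label ++ ": " ++ v]
      | none => ps)
      = fun (ps : List String) label =>
          ps ++ ((N.get? label).map (fun v => label ++ ": " ++ v)).toList := by
    funext ps label
    cases N.get? label <;> simp
  rw [hfun, PySem.List.foldl_append_eq_flatMap, List.nil_append,
    List.filterMap_eq_flatMap_toList]
  simp only [pvGroups, List.flatMap_cons, List.flatMap_nil, List.append_nil]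
  rw [hfv "Drive" pvSynDrive (by decide), hfv "Body" pvSynBody (by decide),
    hfv "Doors" pvSynDoors (by decide), hfv "Engine" pvSynEngine (by decide),
    hfv "Trans" pvSynTrans (by decide), hfv "Fuel" pvSynFuel (by decide),
    hfv "Title" pvSynTitle (by decide)]
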